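-- pv_equiv track=rewrite | github.com/AntonTerehovPerm/USML | Back End/The End Project BE/Pars.py | symbol_str
-- ===== SOURCE A (Python) =====
-- def symbol_str(stroka):
--     '''
--     Все символы в строке и их количество + место расположения
--     '''
--     symbol = {}
--     for i,x in enumerate(stroka):
--         if symbol.get(x) == None:
--             symbol[x] = 1,[i]
--         else:
--             symbol[x][1].append(i)
--             symbol[x] = symbol[x][0]+1,symbol[x][1]
--     return symbol
-- ===== SOURCE B (Python) =====
-- def symbol_str(stroka):
--     return {x: (stroka.count(x), [i for i, c in enumerate(stroka) if c == x])
--             for x in dict.fromkeys(stroka)}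
-- ===== Notes on version B (the rewrite author's own statement) =====
-- stated objective: alternative
-- what changed: B abandons A's single-pass dict of running (count, positions) tuples: it first computes the distinct characters (dict.fromkeys), then for each distinct character scans the string independently, getting the count from str.count and the positions from a filtering comprehension over enumerate, trading A's O(n) one-pass grouping for O(n*k) per-character scans.
import Mathlib
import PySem

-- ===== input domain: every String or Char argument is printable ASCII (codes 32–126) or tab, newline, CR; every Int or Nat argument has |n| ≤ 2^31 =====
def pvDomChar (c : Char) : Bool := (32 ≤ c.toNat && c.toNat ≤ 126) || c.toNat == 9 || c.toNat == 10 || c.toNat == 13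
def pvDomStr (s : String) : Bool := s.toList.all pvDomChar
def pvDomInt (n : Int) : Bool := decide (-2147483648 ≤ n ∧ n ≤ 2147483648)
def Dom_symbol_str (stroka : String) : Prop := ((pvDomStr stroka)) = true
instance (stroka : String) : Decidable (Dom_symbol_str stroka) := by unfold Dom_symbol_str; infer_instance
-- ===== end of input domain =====

-- B replaces A's single-pass grouping dict by per-distinct-character scans (str.count + a
-- filtering comprehension); an alternative O(n*k) organisation, return values proved equal.

-- ===== PORT A =====
-- A's fused loop: one dict holding (count, positions); the count is maintained incrementally
-- and the tuple rebuilt at each occurrence (append + reassign = insert of (c+1, l++[i])).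
def symbol_str (stroka : String) : List (String × Int × List Int) :=
  ((PySem.List.enumerate (stroka.toList.map (fun c => String.ofList [c])) 0).foldl
    (fun d p =>
      match d.get? p.2 with
      | none => d.insert p.2 (1, [p.1])
      | some cl => d.insert p.2 (cl.1 + 1, cl.2 ++ [p.1]))
    PySem.Dict.empty).items

-- ===== PORT B =====
-- B: distinct characters first (dict.fromkeys = PySem.List.dedup), then one independent scan
-- per distinct character: str.count for the count, a filter over enumerate for the positions.
def symbol_str_alt (stroka : String) : List (String × Int × List Int) :=
  let cs := stroka.toList.map (fun c => String.ofList [c])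
  (PySem.List.dedup cs).map (fun x =>
    (x, ((PySem.Str.count stroka x : Int),
         ((PySem.List.enumerate cs 0).filter (fun p => p.2 == x)).map (·.1))))

-- ===== PRECONDITION & SPEC =====
def Spec_symbol_str (stroka : String) (out : List (String × Int × List Int)) : Prop := out = symbol_str_alt stroka
instance (stroka : String) (out : List (String × Int × List Int)) : Decidable (Spec_symbol_str stroka out) := by unfold Spec_symbol_str; infer_instance

-- ===== CLAIM (what is proved, stated in full; the proofs are below) =====
def Claim_equal_symbol_str : Prop := ∀ (stroka : String), Dom_symbol_str stroka → Spec_symbol_str stroka (symbol_str stroka)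

-- ===== LEMMAS AND PROOFS =====

/-- A's loop step equals inserting (old count + 1-per-occurrence, positions ++ [i]); in fact
A's dict is pointwise the positions dict decorated with the length. -/
def mapD (d : PySem.Dict String (List Int)) : PySem.Dict String (Int × List Int) :=
  PySem.Dict.mk (d.items.map (fun p => (p.1, ((p.2.length : Int), p.2))))

lemma get?_mapD (d : PySem.Dict String (List Int)) (x : String) :
    (mapD d).get? x = (d.get? x).map (fun l => ((l.length : Int), l)) := by
  obtain ⟨items⟩ := d
  induction items with
  | nil => simp [mapD, PySem.Dict.get?]
  | cons p rest ih =>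
    simp only [mapD, List.map_cons] at *
    rw [PySem.Dict.get?_mk_cons, PySem.Dict.get?_mk_cons]
    by_cases h : p.1 == x <;> simp [h, ih]

lemma keys_mapD (d : PySem.Dict String (List Int)) : (mapD d).keys = d.keys := by
  simp only [PySem.Dict.keys, mapD, List.map_map]
  rfl

lemma contains_mapD (d : PySem.Dict String (List Int)) (x : String) :
    (mapD d).contains x = d.contains x := by
  rw [PySem.Dict.contains_eq_decide_mem_keys, PySem.Dict.contains_eq_decide_mem_keys, keys_mapD]

lemma items_mapD (d : PySem.Dict String (List Int)) :
    (mapD d).items = d.items.map (fun p => (p.1, ((p.2.length : Int), p.2))) := rfl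

lemma insert_mapD (d : PySem.Dict String (List Int)) (x : String) (l : List Int) :
    mapD (d.insert x l) = (mapD d).insert x ((l.length : Int), l) := by
  apply PySem.Dict.ext
  rw [items_mapD, PySem.Dict.items_insert, PySem.Dict.items_insert, contains_mapD, items_mapD]
  by_cases h : d.contains x = true
  · simp only [h, if_true, List.map_map]
    refine List.map_congr_left fun p _ => ?_
    by_cases hx : p.1 = x <;> simp [hx]
  · simp [h]

lemma step_comm (d : PySem.Dict String (List Int)) (p : Int × String) :
    (match (mapD d).get? p.2 with
      | none => (mapD d).insert p.2 (1, [p.1])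
      | some cl => (mapD d).insert p.2 (cl.1 + 1, cl.2 ++ [p.1]))
    = mapD (d.insert p.2 (d.getD p.2 [] ++ [p.1])) := by
  rw [get?_mapD, PySem.Dict.getD_eq_get?_getD]
  cases h : d.get? p.2 with
  | none => simp [insert_mapD]
  | some l =>
    simp only [Option.map_some, insert_mapD, Option.getD_some]
    congr 1
    simp

lemma foldl_comm (l : List (Int × String)) (d : PySem.Dict String (List Int)) :
    l.foldl (fun d p =>
      match d.get? p.2 with
      | none => d.insert p.2 (1, [p.1])
      | some cl => d.insert p.2 (cl.1 + 1, cl.2 ++ [p.1])) (mapD d)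
    = mapD (l.foldl (fun d p => d.insert p.2 (d.getD p.2 [] ++ [p.1])) d) := by
  induction l generalizing d with
  | nil => rfl
  | cons p rest ih => simp only [List.foldl_cons, step_comm, ih]

/-- getD of the positions fold: old value ++ the matching indices. -/
lemma getD_posFold (l : List (Int × String)) (d : PySem.Dict String (List Int)) (x : String) :
    (l.foldl (fun d p => d.insert p.2 (d.getD p.2 [] ++ [p.1])) d).getD x []
      = d.getD x [] ++ (l.filter (fun p => p.2 == x)).map (·.1) := by
  induction l generalizing d with
  | nil => simp
  | cons p rest ih =>
    simp only [List.foldl_cons, List.filter_cons, ih]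
    by_cases h : p.2 = x
    · subst h; simp [PySem.Dict.getD_insert_self]
    · have hb : (p.2 == x) = false := by simp [h]
      rw [PySem.Dict.getD_insert_of_ne]
      · simp [hb]
      · simpa using fun e => h e.symm

lemma keys_posFold (l : List (Int × String)) :
    (l.foldl (fun d p => d.insert p.2 (d.getD p.2 [] ++ [p.1])) PySem.Dict.empty).keys
      = PySem.Set.ofList (l.map (·.2)) := by
  rw [PySem.Dict.keys_foldl_insert_key l (·.2) (fun d p => d.getD p.2 [] ++ [p.1]) PySem.Dict.empty]
  rfl

lemma nodup_keys_posFold (l : List (Int × String)) :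
    (l.foldl (fun d p => d.insert p.2 (d.getD p.2 [] ++ [p.1])) PySem.Dict.empty).keys.Nodup := by
  exact PySem.Dict.nodup_keys_foldl_insert_key l (·.2) _ PySem.Dict.empty (by simp [PySem.Dict.keys, PySem.Dict.empty])

/-- single-character str.count is plain character counting. -/
lemma chars_count_singleton (cs : List Char) (c : Char) :
    PySem.Chars.count cs [c] = cs.count c := by
  suffices h : ∀ fuel acc (cs : List Char), cs.length ≤ fuel →
      PySem.Chars.count.go [c] fuel cs acc = acc + cs.count c by
    simpa [PySem.Chars.count] using h cs.length 0 cs le_rfl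
  intro fuel acc cs hle
  induction cs generalizing fuel acc with
  | nil => cases fuel <;> simp [PySem.Chars.count.go]
  | cons hd t ih =>
    cases fuel with
    | zero => simp at hle
    | succ n =>
      simp only [PySem.Chars.count.go]
      by_cases hc : c = hd
      · subst hc
        have hp : ([c].isPrefixOf (c :: t)) = true := by simp [List.isPrefixOf]
        rw [hp]
        simp only [if_true, List.length_singleton, List.drop_one, List.tail_cons]
        rw [ih n (acc + 1) (Nat.le_of_succ_le_succ hle)]
        simp
        omega
      · have hp : ([c].isPrefixOf (hd :: t)) = false := by
          simp [List.isPrefixOf, hc]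
        rw [hp, if_neg (by simp), ih n acc (Nat.le_of_succ_le_succ hle)]
        have : ¬ hd = c := fun e => hc e.symm
        simp [this]

-- ===== VERDICT (by name: the statement is the Claim_ definition above) =====
theorem symbol_str_spec : Claim_equal_symbol_str := by
  intro stroka _
  show symbol_str stroka = symbol_str_alt stroka
  unfold symbol_str symbol_str_alt
  set cs := stroka.toList.map (fun c => String.ofList [c]) with hcs
  set l := PySem.List.enumerate cs 0 with hl
  rw [show (PySem.Dict.empty : PySem.Dict String (Int × List Int)) = mapD PySem.Dict.empty from rfl,
    foldl_comm, items_mapD,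
    PySem.Dict.items_eq_map_keys _ (nodup_keys_posFold l) [], keys_posFold, List.map_map]
  have hsnd : l.map (·.2) = cs := PySem.List.map_snd_enumerate cs 0
  rw [hsnd, ← PySem.List.dedup_eq_ofList]
  refine List.map_congr_left fun x hx => ?_
  simp only [Function.comp, getD_posFold, PySem.Dict.getD_empty, List.nil_append]
  have hcount : (PySem.Str.count stroka x : Int)
      = (((l.filter (fun p => p.2 == x)).map (·.1)).length : Int) := by
    obtain ⟨c, hc, rfl⟩ : ∃ c, c ∈ stroka.toList ∧ x = String.ofList [c] := by
      have := (PySem.List.mem_dedup cs x).1 hx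
      rw [hcs] at this
      obtain ⟨c, hc, h⟩ := List.mem_map.1 this
      exact ⟨c, hc, h.symm⟩
    have h1 : PySem.Str.count stroka (String.ofList [c]) = stroka.toList.count c := by
      have ht : (String.ofList [c]).toList = [c] := by simp
      simp [PySem.Str.count, ht, chars_count_singleton]
    have h2 : (l.filter (fun p => p.2 == String.ofList [c])).length
        = l.countP (fun p => p.2 == String.ofList [c]) :=
      (List.countP_eq_length_filter).symm
    have h3 : l.countP (fun p => p.2 == String.ofList [c]) = cs.count (String.ofList [c]) := by
      rw [← hsnd, List.count, List.countP_map]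
      rfl
    have hinj : Function.Injective (fun c => String.ofList [c]) := by
      intro a b hab
      simpa using congrArg String.toList hab
    have h4 : cs.count (String.ofList [c]) = stroka.toList.count c := by
      rw [hcs]
      exact List.count_map_of_injective _ _ hinj _
    rw [h1, List.length_map, h2, h3, h4]
  rw [hcount]
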